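-- pv_equiv track=rewrite | github.com/lendkhoa/algorithm-py | algorithm_py/aws/outliner.py | find_greatest_outlier
-- ===== SOURCE A (Python) =====
-- def find_greatest_outlier(arr):
--     n = len(arr)
--     if n < 3:
--         return None  # Not enough elements to have outliers
--
--     potential_outliers = []
--
--     for i in range(n):
--         # Create a copy of the array without the current element
--         subset = arr[:i] + arr[i+1:]
--         subset_sum = sum(subset[:-1])  # Sum of all elements except the last one
--
--         # Check if the last element of the subset is equal to the sum of the rest
--         if subset[-1] == subset_sum:
--             potential_outliers.append(arr[i])
--
--     # Return the greatest outlier if any found, otherwise None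
--     return max(potential_outliers) if potential_outliers else None
-- ===== SOURCE B (Python) =====
-- def find_greatest_outlier(arr):
--     n = len(arr)
--     if n < 3:
--         return None
--     total = sum(arr)
--     last = arr[-1]
--     second = arr[-2]
--     target = total - 2 * last
--     cands = []
--     if target in arr[:-1]:
--         cands.append(target)
--     if second == total - last - second:
--         cands.append(last)
--     return max(cands) if cands else None
-- ===== Notes on version B (the rewrite author's own statement) =====
-- stated objective: faster
-- what changed: A rebuilds each (n-1)-element subset and re-sums it for every index (O(n^2)); B precomputes the total sum once and evaluates each removal's condition in closed form: removing a non-final element leaves the final element as the compared one, so that condition collapses to 'element == total - 2*last', and removing the final element is one O(1) check on the second-to-last element.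
import Mathlib
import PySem

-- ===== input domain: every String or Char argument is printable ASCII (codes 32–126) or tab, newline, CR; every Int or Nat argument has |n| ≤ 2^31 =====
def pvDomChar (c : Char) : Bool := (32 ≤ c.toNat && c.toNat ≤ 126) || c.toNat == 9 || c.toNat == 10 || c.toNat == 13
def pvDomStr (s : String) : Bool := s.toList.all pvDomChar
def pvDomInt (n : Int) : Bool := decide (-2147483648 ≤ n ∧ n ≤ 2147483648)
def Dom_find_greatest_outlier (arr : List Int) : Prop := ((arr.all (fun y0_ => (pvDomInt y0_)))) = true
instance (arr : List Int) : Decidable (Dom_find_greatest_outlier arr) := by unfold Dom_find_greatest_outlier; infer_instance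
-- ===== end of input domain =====

-- B replaces A's quadratic remove-and-resum loop by O(1) closed-form conditions over the precomputed total sum (objective: faster).

-- ===== PORT A =====
def find_greatest_outlier (arr : List Int) : Option Int :=
  let n : Int := PySem.List.len arr
  if n < 3 then none
  else
    let potential_outliers : List Int := (PySem.List.pyRange 0 n 1).foldl (fun acc i =>
      let subset := PySem.List.slice arr none (some i) ++ PySem.List.slice arr (some (i+1)) none
      let subset_sum := (PySem.List.slice subset none (some (-1))).sum
      if PySem.List.pyGet? subset (-1) = some subset_sum then
        acc ++ [PySem.List.pyGetD arr i 0]   -- arr[i]: i ∈ range(len(arr)), always in range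
      else acc) []
    if potential_outliers = [] then none
    else PySem.List.max? potential_outliers (fun x => x)

-- ===== PORT B =====
def find_greatest_outlier_alt (arr : List Int) : Option Int :=
  let n : Int := PySem.List.len arr
  if n < 3 then none
  else
    let total : Int := arr.sum
    let last : Int := PySem.List.pyGetD arr (-1) 0     -- arr[-1]: len ≥ 3, in range
    let second : Int := PySem.List.pyGetD arr (-2) 0   -- arr[-2]: len ≥ 3, in range
    let target : Int := total - 2 * last
    let cands : List Int :=
      (if target ∈ PySem.List.slice arr none (some (-1)) then [target] else []) ++
      (if second = total - last - second then [last] else [])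
    if cands = [] then none
    else PySem.List.max? cands (fun x => x)

-- ===== PRECONDITION & SPEC =====
def Spec_find_greatest_outlier (arr : List Int) (out : Option Int) : Prop := out = find_greatest_outlier_alt arr
instance (arr : List Int) (out : Option Int) : Decidable (Spec_find_greatest_outlier arr out) := by unfold Spec_find_greatest_outlier; infer_instance

-- ===== CLAIM (what is proved, stated in full; the proofs are below) =====
def Claim_equal_find_greatest_outlier : Prop := ∀ (arr : List Int), Dom_find_greatest_outlier arr → Spec_find_greatest_outlier arr (find_greatest_outlier arr)

-- ===== LEMMAS AND PROOFS =====

theorem fgo_subset_eq (arr : List Int) (k : Nat) :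
    PySem.List.slice arr none (some (k:Int)) ++ PySem.List.slice arr (some ((k:Int)+1)) none
      = arr.take k ++ arr.drop (k+1) := by
  have h1 : ((k:Int)+1) = (((k+1 : Nat)) : Int) := by push_cast; ring
  rw [PySem.List.slice_to_natCast, h1, PySem.List.slice_from_natCast]

theorem fgo_sum_remove (arr : List Int) (k : Nat) (hk : k < arr.length) :
    (arr.take k ++ arr.drop (k+1)).sum = arr.sum - arr.getD k 0 := by
  have hd : arr.drop k = arr.getD k 0 :: arr.drop (k+1) := by
    rw [List.getD_eq_getElem _ _ hk]; exact List.drop_eq_getElem_cons hk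
  have h2 : arr.sum = (arr.take k).sum + (arr.getD k 0 + (arr.drop (k+1)).sum) := by
    conv_lhs => rw [← List.take_append_drop k arr]
    rw [hd, List.sum_append, List.sum_cons]
  rw [List.sum_append]; omega

theorem fgo_sum_dropLast (l : List Int) (h : l ≠ []) :
    l.dropLast.sum = l.sum - l.getLast h := by
  have h2 : l.sum = l.dropLast.sum + l.getLast h := by
    conv_lhs => rw [← List.dropLast_concat_getLast h]
    rw [List.sum_append, List.sum_cons, List.sum_nil]; omega
  omega

theorem fgo_foldl_max_const (t : Int) (L : List Int) (hL : ∀ x ∈ L, x = t) :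
    L.foldl max t = t := by
  induction L with
  | nil => rfl
  | cons x l ih =>
    simp only [List.foldl_cons]
    rw [hL x (by simp), max_self]
    exact ih (fun y hy => hL y (by simp [hy]))

theorem fgo_max_prefix (t : Int) (L M : List Int) (hL : ∀ x ∈ L, x = t) :
    PySem.List.max? ((t :: L) ++ M) (fun x => x) = PySem.List.max? (t :: M) (fun x => x) := by
  rw [List.cons_append, PySem.List.max?_id_cons, PySem.List.max?_id_cons,
    List.foldl_append, fgo_foldl_max_const t L hL]

theorem fgo_front_iff (arr : List Int) (hn : 3 ≤ arr.length) (k : Nat) (hk : k < arr.length - 1) :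
    ((arr.take k ++ arr.drop (k+1)).getLast? = some ((arr.take k ++ arr.drop (k+1)).dropLast.sum))
      ↔ arr.getD k 0 = arr.sum - 2 * arr.getD (arr.length - 1) 0 := by
  have hdne : arr.drop (k+1) ≠ [] := by
    intro hcon
    have := List.drop_eq_nil_iff.mp hcon
    omega
  have hSne : (arr.take k ++ arr.drop (k+1)) ≠ [] := by
    intro hcon
    exact hdne (List.append_eq_nil_iff.mp hcon).2
  have hlast : (arr.take k ++ arr.drop (k+1)).getLast? = some (arr.getD (arr.length - 1) 0) := by
    rw [List.getLast?_append_of_ne_nil _ hdne, List.getLast?_eq_getElem?]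
    have hidx : k + 1 + ((arr.drop (k+1)).length - 1) = arr.length - 1 := by
      simp only [List.length_drop]; omega
    rw [List.getElem?_drop, hidx, List.getElem?_eq_getElem (by omega),
      List.getD_eq_getElem _ _ (by omega)]
  have hlastS : (arr.take k ++ arr.drop (k+1)).getLast hSne = arr.getD (arr.length - 1) 0 :=
    Option.some.inj ((List.getLast?_eq_some_getLast hSne).symm.trans hlast)
  rw [List.getLast?_eq_some_getLast hSne, Option.some_inj, fgo_sum_dropLast _ hSne,
    fgo_sum_remove arr k (by omega), hlastS]
  omega

theorem fgo_last_iff (arr : List Int) (hn : 3 ≤ arr.length) :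
    ((arr.take (arr.length - 1) ++ arr.drop (arr.length - 1 + 1)).getLast? =
        some ((arr.take (arr.length - 1) ++ arr.drop (arr.length - 1 + 1)).dropLast.sum))
      ↔ arr.getD (arr.length - 2) 0
          = arr.sum - arr.getD (arr.length - 1) 0 - arr.getD (arr.length - 2) 0 := by
  have he : arr.drop (arr.length - 1 + 1) = [] := by
    rw [List.drop_eq_nil_iff]; omega
  rw [he, List.append_nil]
  have hlen : (arr.take (arr.length - 1)).length = arr.length - 1 := by
    rw [List.length_take]; omega
  have hSne : arr.take (arr.length - 1) ≠ [] := by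
    intro hcon; rw [hcon] at hlen; simp at hlen; omega
  have hidx : arr.length - 1 - 1 = arr.length - 2 := by omega
  have hlast : (arr.take (arr.length - 1)).getLast? = some (arr.getD (arr.length - 2) 0) := by
    rw [List.getD_eq_getElem _ _ (show arr.length - 2 < arr.length by omega)]
    rw [List.getLast?_eq_getElem?, hlen, hidx, List.getElem?_take, if_pos (by omega),
      List.getElem?_eq_getElem (by omega)]
  have hlastS : (arr.take (arr.length - 1)).getLast hSne = arr.getD (arr.length - 2) 0 :=
    Option.some.inj ((List.getLast?_eq_some_getLast hSne).symm.trans hlast)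
  have hdl : (arr.take (arr.length - 1)).dropLast = arr.take (arr.length - 2) := by
    rw [List.dropLast_eq_take, hlen, hidx, List.take_take]
    congr 1; omega
  have hsum2 : (arr.take (arr.length - 2)).sum
      = arr.sum - arr.getD (arr.length - 1) 0 - arr.getD (arr.length - 2) 0 := by
    have hidx2 : arr.length - 2 + 1 = arr.length - 1 := by omega
    have hd1 : arr.drop (arr.length - 2) = arr.getD (arr.length - 2) 0 :: arr.drop (arr.length - 2 + 1) := by
      rw [List.getD_eq_getElem _ _ (by omega)]; exact List.drop_eq_getElem_cons (by omega)
    have hd2 : arr.drop (arr.length - 1) = arr.getD (arr.length - 1) 0 :: arr.drop (arr.length - 1 + 1) := by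
      rw [List.getD_eq_getElem _ _ (by omega)]
      exact List.drop_eq_getElem_cons (by omega)
    have hd3 : arr.drop (arr.length - 1 + 1) = [] := by
      rw [List.drop_eq_nil_iff]; omega
    have h2 : arr.sum = (arr.take (arr.length - 2)).sum
        + (arr.getD (arr.length - 2) 0 + (arr.getD (arr.length - 1) 0 + 0)) := by
      conv_lhs => rw [← List.take_append_drop (arr.length - 2) arr]
      rw [hd1, hidx2, hd2, hd3, List.sum_append, List.sum_cons, List.sum_cons, List.sum_nil]
    omega
  rw [List.getLast?_eq_some_getLast hSne, Option.some_inj, hlastS, hdl, hsum2]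
theorem fgo_po_char (arr : List Int) (hn : 3 ≤ arr.length) :
    List.map (fun x => PySem.List.pyGetD arr x 0)
      (List.filter
        (fun x => decide
          (PySem.List.pyGet? (PySem.List.slice arr none (some x) ++ PySem.List.slice arr (some (x + 1)) none) (-1) =
            some (PySem.List.slice
              (PySem.List.slice arr none (some x) ++ PySem.List.slice arr (some (x + 1)) none)
              none (some (-1))).sum))
        ((List.range arr.length).map (fun (k : Nat) => (k : Int))))
    = (((List.range (arr.length - 1)).filter
          (fun k => decide (arr.getD k 0 = arr.sum - 2 * arr.getD (arr.length - 1) 0))).map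
            (fun k => arr.getD k 0))
      ++ (if arr.getD (arr.length - 2) 0
              = arr.sum - arr.getD (arr.length - 1) 0 - arr.getD (arr.length - 2) 0
          then [arr.getD (arr.length - 1) 0] else []) := by
  rw [List.filter_map, List.map_map]
  have hsplit : List.range arr.length = List.range (arr.length - 1) ++ [arr.length - 1] := by
    rw [← List.range_succ]; congr 1; omega
  rw [hsplit, List.filter_append, List.map_append]
  congr 1
  · -- the first n-1 removals: removing arr[k] keeps arr[-1] as the compared last element
    rw [List.filter_congr (q := fun k =>
        decide (arr.getD k 0 = arr.sum - 2 * arr.getD (arr.length - 1) 0)) ?_]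
    · apply List.map_congr_left
      intro k _
      simp only [Function.comp, PySem.List.pyGetD_natCast]
    · intro k hk
      have hk' : k < arr.length - 1 := List.mem_range.mp hk
      simp only [Function.comp]
      rw [fgo_subset_eq]
      simp only [PySem.List.pyGet?_neg_one, PySem.List.slice_to_neg_one]
      exact decide_eq_decide.mpr (fgo_front_iff arr hn k hk')
  · -- the last removal: the compared last element becomes arr[-2]
    rw [List.filter_singleton]
    have hiff : (decide
        (PySem.List.pyGet? (PySem.List.slice arr none (some ((arr.length - 1 : Nat) : Int)) ++
            PySem.List.slice arr (some (((arr.length - 1 : Nat) : Int) + 1)) none) (-1) =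
          some (PySem.List.slice
            (PySem.List.slice arr none (some ((arr.length - 1 : Nat) : Int)) ++
              PySem.List.slice arr (some (((arr.length - 1 : Nat) : Int) + 1)) none)
            none (some (-1))).sum))
        = decide (arr.getD (arr.length - 2) 0
            = arr.sum - arr.getD (arr.length - 1) 0 - arr.getD (arr.length - 2) 0) := by
      rw [fgo_subset_eq]
      simp only [PySem.List.pyGet?_neg_one, PySem.List.slice_to_neg_one]
      exact decide_eq_decide.mpr (fgo_last_iff arr hn)
    simp only [Function.comp_apply]
    rw [hiff]
    by_cases hb : arr.getD (arr.length - 2) 0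
        = arr.sum - arr.getD (arr.length - 1) 0 - arr.getD (arr.length - 2) 0
    · rw [decide_eq_true hb, cond_true, if_pos hb]
      simp [PySem.List.pyGetD_natCast]
    · rw [decide_eq_false hb, cond_false, if_neg hb, List.map_nil]

theorem fgo_main (arr : List Int) : find_greatest_outlier arr = find_greatest_outlier_alt arr := by
  unfold find_greatest_outlier find_greatest_outlier_alt
  simp only [PySem.List.len_eq]
  by_cases h3 : ((arr.length : Int) < 3)
  · simp only [if_pos h3]
  · simp only [if_neg h3]
    have hn : 3 ≤ arr.length := by omega
    have hne : arr ≠ [] := by intro h; rw [h] at hn; simp at hn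
    have hrange : PySem.List.pyRange 0 (arr.length : Int) 1 = (List.range arr.length).map (fun (k : Nat) => (k : Int)) := by
      rw [PySem.List.pyRange_one]
      norm_num
    rw [hrange]
    simp only [PySem.List.foldl_append_ite, List.nil_append]
    rw [fgo_po_char arr hn]
    -- B-side primitives in closed form
    have hlastB : PySem.List.pyGetD arr (-1) 0 = arr.getD (arr.length - 1) 0 := by
      rw [PySem.List.pyGetD_neg_one arr 0 hne, List.getLast_eq_getElem,
        List.getD_eq_getElem _ _ (show arr.length - 1 < arr.length by omega)]
    have hsecB : PySem.List.pyGetD arr (-2) 0 = arr.getD (arr.length - 2) 0 := by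
      have h2 : (-2 : Int) = -((2 : Nat) : Int) := by norm_num
      rw [h2, PySem.List.pyGetD_neg_natCast arr 2 0 (by omega) (by omega),
        List.getD_eq_getElem _ _ (show arr.length - 2 < arr.length by omega)]
    rw [hlastB, hsecB, PySem.List.slice_to_neg_one, List.dropLast_eq_take]
    set t := arr.sum - 2 * arr.getD (arr.length - 1) 0 with ht
    set M2 := (if arr.getD (arr.length - 2) 0
        = arr.sum - arr.getD (arr.length - 1) 0 - arr.getD (arr.length - 2) 0
      then [arr.getD (arr.length - 1) 0] else []) with hM2
    by_cases hm : t ∈ arr.take (arr.length - 1)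
    · -- the closed-form target occurs among the first n-1 elements
      have hex : ∃ j, j < arr.length - 1 ∧ arr.getD j 0 = t := by
        obtain ⟨j, hj, he⟩ := List.getElem_of_mem hm
        have hjl : j < arr.length - 1 := by rw [List.length_take] at hj; omega
        refine ⟨j, hjl, ?_⟩
        rw [List.getD_eq_getElem _ _ (by omega), ← he, List.getElem_take]
      obtain ⟨j, hjl, hje⟩ := hex
      have htm : t ∈ (((List.range (arr.length - 1)).filter
          (fun k => decide (arr.getD k 0 = t))).map (fun k => arr.getD k 0)) := by
        refine List.mem_map.mpr ⟨j, List.mem_filter.mpr ⟨List.mem_range.mpr hjl, decide_eq_true hje⟩, hje⟩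
      have hall : ∀ x ∈ (((List.range (arr.length - 1)).filter
          (fun k => decide (arr.getD k 0 = t))).map (fun k => arr.getD k 0)), x = t := by
        intro x hx
        obtain ⟨k, hk, he⟩ := List.mem_map.mp hx
        rw [← he]
        exact of_decide_eq_true (List.mem_filter.mp hk).2
      obtain ⟨h0, tl, hM1⟩ := List.exists_cons_of_ne_nil (List.ne_nil_of_mem htm)
      have h0t : h0 = t := hall h0 (by rw [hM1]; exact List.mem_cons_self)
      rw [hM1, h0t, if_pos hm]
      rw [if_neg (show ¬((t :: tl) ++ M2 = []) by simp), List.singleton_append,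
        if_neg (show ¬(t :: M2 = []) by simp)]
      exact fgo_max_prefix t tl _ (fun x hx => hall x (by rw [hM1]; exact List.mem_cons_of_mem _ hx))
    · -- no first-n-1 removal works: the filter is empty
      have hf : ((List.range (arr.length - 1)).filter (fun k => decide (arr.getD k 0 = t))) = [] := by
        rw [List.filter_eq_nil_iff]
        intro k hk hdec
        have hk' : k < arr.length - 1 := List.mem_range.mp hk
        apply hm
        rw [← of_decide_eq_true hdec, List.getD_eq_getElem _ _ (by omega),
          ← List.getElem_take (h := show k < (arr.take (arr.length - 1)).length by
            rw [List.length_take]; omega)]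
        exact List.getElem_mem _
      rw [hf, if_neg hm]
      simp only [List.map_nil, List.nil_append]

-- ===== VERDICT (by name: the statement is the Claim_ definition above) =====
theorem find_greatest_outlier_spec : Claim_equal_find_greatest_outlier := by
  intro arr _
  unfold Spec_find_greatest_outlier
  exact fgo_main arr
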